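-- pv_equiv track=rewrite | github.com/iamjuli0/programas-UFAM | 1° periodo/IC/bloco3.py | m_mais_ponto
-- ===== SOURCE A (Python) =====
-- def find_indexs(lado_a, mesa):
--     indece = []
--     for ind in range(0, len(mesa)):
--         if len(mesa[ind]) != 0 and lado_a == mesa[ind][0]:
--             indece.append(ind)
--     return indece
--
-- def ponta_que_entra(pedra, ponta):
--     if pedra[0] == ponta[0] and pedra[0] != pedra[1]:
--         return [pedra[1]]
--     elif pedra[0] == ponta[0] and pedra[0] == pedra[1]:
--         return [pedra[0], pedra[1]]
--     else:
--         return [pedra[0]]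
--
-- def joga_pedra(pedra, mesa, index):
--
--     valores_anteriores = mesa[:index]
--     if len(mesa) != index + 1:
--         valores_posteriores = mesa[(index + 1) :]
--     else:
--         valores_posteriores = ()
--
--     return (
--         valores_anteriores
--         + (ponta_que_entra(pedra, mesa[index]),)
--         + valores_posteriores
--     )
--
-- def head(xs):
-- 	return xs[0]
--
-- def tail(xs):
-- 	return [x for x in xs][1:]
--
-- def suma(values):
--     if len(values) == 0:
--         return 0
--
--     return head(values) + suma(tail(values))
--
-- def sum_pontas(pontas):
--     if len(pontas) == 0:
--         return 0
--     return suma(pontas[0]) + sum_pontas(pontas[1:])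
--
-- def m_mais_ponto(pedra, mesa):
--
--     indexs = find_indexs(pedra[0], mesa) + find_indexs(pedra[1], mesa)
--
--     maior_ponto = 0
--     maior_ponto_index = 0
--
--     for inx in indexs:
--         if maior_ponto <= sum_pontas(joga_pedra(pedra, mesa, inx)):
--             maior_ponto = sum_pontas(joga_pedra(pedra, mesa, inx))
--             maior_ponto_index = inx
--
--     return (maior_ponto, maior_ponto_index)
-- ===== SOURCE B (Python) =====
-- def m_mais_ponto(pedra, mesa):
--     # One pass: precompute the total board sum once, then score each playable
--     # index by an O(1) delta (remove the replaced end, add the entering end).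
--     a, b = pedra[0], pedra[1]
--     total = sum(sum(row) for row in mesa)
--     best = 0
--     best_index = 0
--     for lado in (a, b):
--         for i, row in enumerate(mesa):
--             if row and row[0] == lado:
--                 if a == row[0] and a != b:
--                     new = [b]
--                 elif a == row[0]:
--                     new = [a, b]
--                 else:
--                     new = [a]
--                 score = total - sum(row) + sum(new)
--                 if best <= score:
--                     best = score
--                     best_index = i
--     return (best, best_index)
-- ===== Notes on version B (the rewrite author's own statement) =====
-- stated objective: faster
-- what changed: B precomputes the total board sum once and scores each playable index with an O(1) delta (subtract the replaced row's sum, add the entering end's sum) in a single enumerate pass per piece side, instead of A's rebuilding the whole board for every candidate index and re-summing it with nested recursions.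
import Mathlib
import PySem

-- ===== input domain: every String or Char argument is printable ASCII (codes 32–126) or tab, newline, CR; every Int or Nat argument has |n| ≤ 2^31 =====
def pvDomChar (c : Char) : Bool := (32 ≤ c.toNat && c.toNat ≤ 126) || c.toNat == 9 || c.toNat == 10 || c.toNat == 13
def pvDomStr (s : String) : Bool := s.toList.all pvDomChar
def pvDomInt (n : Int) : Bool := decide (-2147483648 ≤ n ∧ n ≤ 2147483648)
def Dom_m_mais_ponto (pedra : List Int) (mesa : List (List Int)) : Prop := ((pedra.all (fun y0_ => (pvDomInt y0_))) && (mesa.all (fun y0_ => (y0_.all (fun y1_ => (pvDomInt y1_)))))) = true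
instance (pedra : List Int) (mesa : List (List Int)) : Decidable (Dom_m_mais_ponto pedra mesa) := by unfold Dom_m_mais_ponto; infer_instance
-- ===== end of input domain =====

-- B replaces A's per-candidate board rebuild + recursive re-summing by a single precomputed
-- total with an O(1) delta per playable index (objective: faster; measured so in a timing run).

-- ===== PORT A =====
def find_indexs (lado_a : Int) (mesa : List (List Int)) : List Int :=
  (PySem.List.pyRange 0 (mesa.length : Int) 1).foldl
    (fun indece ind =>
      -- mesa[ind]: ind ranges over range(len(mesa)), so pyGetD is exact
      if (PySem.List.pyGetD mesa ind []).length ≠ 0 ∧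
          lado_a = PySem.List.pyGetD (PySem.List.pyGetD mesa ind []) 0 0
      then indece ++ [ind] else indece)
    []

def ponta_que_entra (pedra ponta : List Int) : List Int :=
  -- pedra[0]/pedra[1]: IndexError when len(pedra) < 2, excluded by Pre_;
  -- ponta[0]: only called on non-empty pontas (find_indexs filters them)
  let p0 := PySem.List.pyGetD pedra 0 0
  let p1 := PySem.List.pyGetD pedra 1 0
  let t0 := PySem.List.pyGetD ponta 0 0
  if p0 = t0 ∧ p0 ≠ p1 then [p1]
  else if p0 = t0 ∧ p0 = p1 then [p0, p1]
  else [p0]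

def joga_pedra (pedra : List Int) (mesa : List (List Int)) (index : Int) : List (List Int) :=
  -- mesa arrives as a Python tuple, so the concatenations below are exact
  let valores_anteriores := PySem.List.slice mesa none (some index)
  let valores_posteriores :=
    if (mesa.length : Int) ≠ index + 1 then PySem.List.slice mesa (some (index + 1)) none else []
  valores_anteriores ++ [ponta_que_entra pedra (PySem.List.pyGetD mesa index [])] ++ valores_posteriores

def suma : List Int → Int
  | [] => 0
  | x :: xs => x + suma xs   -- head(values) + suma(tail(values))

def sum_pontas : List (List Int) → Int
  | [] => 0
  | p :: ps => suma p + sum_pontas ps   -- suma(pontas[0]) + sum_pontas(pontas[1:])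

def m_mais_ponto (pedra : List Int) (mesa : List (List Int)) : List Int :=
  let indexs := find_indexs (PySem.List.pyGetD pedra 0 0) mesa
                ++ find_indexs (PySem.List.pyGetD pedra 1 0) mesa
  let st := indexs.foldl
    (fun (st : Int × Int) inx =>
      if st.1 ≤ sum_pontas (joga_pedra pedra mesa inx)
      then (sum_pontas (joga_pedra pedra mesa inx), inx)
      else st)
    (0, 0)
  [st.1, st.2]

-- ===== PORT B =====
def pvInner (a b total lado : Int) (st : Int × Int) (p : Int × List Int) : Int × Int :=
  match p.2 with
  | [] => st
  | h :: t =>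
    if h = lado then
      let newRow := if a = h ∧ a ≠ b then [b] else if a = h then [a, b] else [a]
      let score := total - (h :: t).sum + newRow.sum
      if st.1 ≤ score then (score, p.1) else st
    else st

def m_mais_ponto_alt (pedra : List Int) (mesa : List (List Int)) : List Int :=
  let a := PySem.List.pyGetD pedra 0 0
  let b := PySem.List.pyGetD pedra 1 0
  let total := (mesa.map (fun r => r.sum)).sum
  let st := [a, b].foldl
    (fun (st : Int × Int) lado => (PySem.List.enumerate mesa 0).foldl (pvInner a b total lado) st)
    (0, 0)
  [st.1, st.2]

-- ===== PRECONDITION & SPEC =====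
-- Pre_ excludes exactly the inputs where Python A raises: pedra[1] is an IndexError when
-- len(pedra) < 2.
def Pre_m_mais_ponto (pedra : List Int) (mesa : List (List Int)) : Prop :=
  2 ≤ pedra.length
instance (pedra : List Int) (mesa : List (List Int)) : Decidable (Pre_m_mais_ponto pedra mesa) := by
  unfold Pre_m_mais_ponto; infer_instance

def pvWitness_m_mais_ponto : List Int × List (List Int) := ([1, 2], [[1, 3], [], [2, 5]])

def Spec_m_mais_ponto (pedra : List Int) (mesa : List (List Int)) (out : List Int) : Prop := out = m_mais_ponto_alt pedra mesa
instance (pedra : List Int) (mesa : List (List Int)) (out : List Int) : Decidable (Spec_m_mais_ponto pedra mesa out) := by unfold Spec_m_mais_ponto; infer_instance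

-- ===== CLAIM (what is proved, stated in full; the proofs are below) =====
def Claim_equal_m_mais_ponto : Prop := ∀ (pedra : List Int) (mesa : List (List Int)), Dom_m_mais_ponto pedra mesa → Pre_m_mais_ponto pedra mesa → Spec_m_mais_ponto pedra mesa (m_mais_ponto pedra mesa)

-- ===== LEMMAS AND PROOFS =====

theorem pv_suma_eq (l : List Int) : suma l = l.sum := by
  induction l with
  | nil => rfl
  | cons x xs ih => simp [suma, ih]

theorem pv_sum_pontas_eq (L : List (List Int)) : sum_pontas L = (L.map (fun r => r.sum)).sum := by
  induction L with
  | nil => rfl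
  | cons p ps ih => simp [sum_pontas, ih, pv_suma_eq]

-- list(enumerate(xs, s)) written index-first, to line the B loop up with A's range loop
theorem pv_enumerate_eq {α : Type} (xs : List α) (d : α) :
    ∀ s : Int, PySem.List.enumerate xs s
      = (List.range xs.length).map (fun k : Nat => ((s + k : Int), xs.getD k d)) := by
  induction xs with
  | nil => intro s; simp [PySem.List.enumerate_nil]
  | cons x xs ih =>
    intro s
    rw [PySem.List.enumerate_cons, ih (s + 1)]
    rw [List.length_cons, List.range_succ_eq_map, List.map_cons, List.map_map]
    congr 1
    · simp
    · apply List.map_congr_left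
      intro k _
      simp only [Function.comp_apply, List.getD_cons_succ, Prod.mk.injEq]
      constructor
      · push_cast; ring
      · trivial

-- replacing row k costs an O(1) delta against the precomputed total
theorem pv_joga_sum (pedra : List Int) (mesa : List (List Int)) (k : Nat) (hk : k < mesa.length) :
    sum_pontas (joga_pedra pedra mesa (k : Int))
      = (mesa.map (fun r => r.sum)).sum - (mesa.getD k []).sum
        + (ponta_que_entra pedra (mesa.getD k [])).sum := by
  have hdec : mesa = mesa.take k ++ mesa[k] :: mesa.drop (k + 1) := by
    conv_lhs => rw [← List.take_append_drop k mesa, List.drop_eq_getElem_cons hk]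
  have hgd : mesa.getD k [] = mesa[k] := List.getD_eq_getElem mesa [] hk
  have hsplit : (mesa.map (fun r => r.sum)).sum
      = ((mesa.take k).map (fun r => r.sum)).sum + mesa[k].sum
        + ((mesa.drop (k + 1)).map (fun r => r.sum)).sum := by
    conv_lhs => rw [hdec]
    rw [List.map_append, List.map_cons, List.sum_append, List.sum_cons]
    ring
  have hpost : (if (mesa.length : Int) ≠ (k : Int) + 1
      then PySem.List.slice mesa (some ((k : Int) + 1)) none else []) = mesa.drop (k + 1) := by
    split_ifs with h
    · have hcast : ((k : Int) + 1) = ((k + 1 : Nat) : Int) := by push_cast; ring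
      rw [hcast, PySem.List.slice_from_natCast]
    · have hlen : mesa.length = k + 1 := by omega
      rw [← hlen]
      exact (List.drop_length (l := mesa)).symm
  unfold joga_pedra
  rw [hpost, PySem.List.slice_to_natCast, PySem.List.pyGetD_natCast, hgd, pv_sum_pontas_eq]
  rw [List.map_append, List.map_append, List.sum_append, List.sum_append,
      List.map_cons, List.map_nil, List.sum_cons, List.sum_nil, hsplit]
  ring

theorem pv_pqe_eq (pedra : List Int) (h : Int) (t : List Int) :
    ponta_que_entra pedra (h :: t)
      = (if PySem.List.pyGetD pedra 0 0 = h ∧ PySem.List.pyGetD pedra 0 0 ≠ PySem.List.pyGetD pedra 1 0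
         then [PySem.List.pyGetD pedra 1 0]
         else if PySem.List.pyGetD pedra 0 0 = h
           then [PySem.List.pyGetD pedra 0 0, PySem.List.pyGetD pedra 1 0]
           else [PySem.List.pyGetD pedra 0 0]) := by
  unfold ponta_que_entra
  simp only [PySem.List.pyGetD_zero_cons]
  split_ifs <;> simp_all

-- B's guarded enumerate pass computes exactly A's fold over find_indexs
theorem pv_inner_eq (pedra : List Int) (mesa : List (List Int)) (lado : Int) (st : Int × Int) :
    (PySem.List.enumerate mesa 0).foldl
      (pvInner (PySem.List.pyGetD pedra 0 0) (PySem.List.pyGetD pedra 1 0)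
        ((mesa.map (fun r => r.sum)).sum) lado) st
    = (find_indexs lado mesa).foldl
        (fun (st : Int × Int) inx =>
          if st.1 ≤ sum_pontas (joga_pedra pedra mesa inx)
          then (sum_pontas (joga_pedra pedra mesa inx), inx)
          else st) st := by
  unfold find_indexs
  rw [PySem.List.foldl_append_ite_eq_filter, List.nil_append,
      ← PySem.List.foldl_ite_eq_foldl_filter, PySem.List.pyRange_zero_natCast, List.foldl_map,
      pv_enumerate_eq mesa [] 0, List.foldl_map]
  apply PySem.List.foldl_congr_mem
  intro acc k hk
  rw [List.mem_range] at hk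
  simp only [zero_add, PySem.List.pyGetD_natCast]
  cases hrow : mesa.getD k [] with
  | nil => simp [pvInner, hrow]
  | cons h t =>
    by_cases hl : h = lado
    · rw [if_pos ⟨by simp [hrow], by simp [hrow, hl]⟩]
      have hS : sum_pontas (joga_pedra pedra mesa (k : Int))
          = (mesa.map (fun r => r.sum)).sum - (h :: t).sum
            + (if PySem.List.pyGetD pedra 0 0 = h ∧ PySem.List.pyGetD pedra 0 0 ≠ PySem.List.pyGetD pedra 1 0
               then [PySem.List.pyGetD pedra 1 0]
               else if PySem.List.pyGetD pedra 0 0 = h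
                 then [PySem.List.pyGetD pedra 0 0, PySem.List.pyGetD pedra 1 0]
                 else [PySem.List.pyGetD pedra 0 0]).sum := by
        rw [pv_joga_sum pedra mesa k hk, hrow, pv_pqe_eq]
      simp [pvInner, hrow, hl, hS]
    · have hcond : ¬ ((h :: t).length ≠ 0 ∧ lado = PySem.List.pyGetD (h :: t) 0 0) := by
        simp only [PySem.List.pyGetD_zero_cons]
        rintro ⟨-, he⟩
        exact hl he.symm
      rw [if_neg hcond]
      simp [pvInner, hrow, hl]

-- ===== VERDICT (by name: the statement is the Claim_ definition above) =====
theorem m_mais_ponto_spec : Claim_equal_m_mais_ponto := by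
  intro pedra mesa _ _
  unfold Spec_m_mais_ponto
  simp only [m_mais_ponto, m_mais_ponto_alt, List.foldl_cons, List.foldl_nil, List.foldl_append]
  rw [pv_inner_eq, pv_inner_eq]
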